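-- pv_equiv track=rewrite | github.com/akhil-reddy/cs572 | assignment2/stats.py | process_fetch_csv
-- ===== SOURCE A (Python) =====
-- from collections import defaultdict
--
-- def process_fetch_csv(fetch_data):
--     attempted = len(fetch_data) - 1  # Subtract 1 to account for header
--     succeeded = sum(1 for row in fetch_data[1:] if row[1].startswith('2'))
--     failed_or_aborted = attempted - succeeded
--     status_codes = defaultdict(int)
--     for row in fetch_data[1:]:  # Skip header row
--         status_codes[row[1]] += 1
--     return attempted, succeeded, failed_or_aborted, status_codes
-- ===== SOURCE B (Python) =====
-- from collections import defaultdict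
--
-- def process_fetch_csv(fetch_data):
--     attempted = len(fetch_data) - 1  # Subtract 1 to account for header
--     status_codes = defaultdict(int)
--     for row in fetch_data[1:]:  # Single pass: build the frequency table first
--         status_codes[row[1]] += 1
--     # Derive the success count from the table instead of a second scan of the rows
--     succeeded = sum(count for code, count in status_codes.items() if code.startswith('2'))
--     failed_or_aborted = attempted - succeeded
--     return attempted, succeeded, failed_or_aborted, status_codes
-- ===== Notes on version B (the rewrite author's own statement) =====
-- stated objective: simpler
-- what changed: B makes a single pass over the rows building the status-code table and derives the success count from the table's entries, instead of A's separate generator pass over the rows for succeeded.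
import Mathlib
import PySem

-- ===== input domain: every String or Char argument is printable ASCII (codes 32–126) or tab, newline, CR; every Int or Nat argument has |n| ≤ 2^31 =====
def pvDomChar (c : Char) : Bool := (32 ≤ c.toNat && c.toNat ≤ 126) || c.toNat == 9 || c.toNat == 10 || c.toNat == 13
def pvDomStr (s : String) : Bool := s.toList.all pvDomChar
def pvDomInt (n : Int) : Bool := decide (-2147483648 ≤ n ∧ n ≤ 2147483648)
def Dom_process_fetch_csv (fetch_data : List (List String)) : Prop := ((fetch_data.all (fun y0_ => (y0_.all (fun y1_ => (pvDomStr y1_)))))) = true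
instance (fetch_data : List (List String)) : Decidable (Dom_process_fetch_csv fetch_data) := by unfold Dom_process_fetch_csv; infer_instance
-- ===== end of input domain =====

-- B builds the status-code table in one pass and derives `succeeded` from it; A scans the rows twice.

-- ===== PORT A =====
-- row[1] (rows have ≥ 2 columns under Pre_)
def pvRowCode (row : List String) : String := (PySem.List.pyGet? row 1).getD ""

def process_fetch_csv (fetch_data : List (List String)) : Int × Int × Int × (List (String × Int)) :=
  let attempted : Int := (fetch_data.length : Int) - 1
  let succeeded : Int :=
    (PySem.List.slice fetch_data (some 1) none).foldl
      (fun acc row => if PySem.Str.startswith (pvRowCode row) "2" then acc + 1 else acc) 0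
  let failed_or_aborted : Int := attempted - succeeded
  let status_codes : PySem.Dict String Int :=
    (PySem.List.slice fetch_data (some 1) none).foldl
      (fun d row => d.modify (pvRowCode row) 0 (· + 1)) PySem.Dict.empty
  (attempted, succeeded, failed_or_aborted, status_codes.items)

-- ===== PORT B =====
def process_fetch_csv_alt (fetch_data : List (List String)) : Int × Int × Int × (List (String × Int)) :=
  let attempted : Int := (fetch_data.length : Int) - 1
  let status_codes : PySem.Dict String Int :=
    (PySem.List.slice fetch_data (some 1) none).foldl
      (fun d row => d.modify (pvRowCode row) 0 (· + 1)) PySem.Dict.empty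
  let succeeded : Int :=
    status_codes.items.foldl
      (fun acc kv => if PySem.Str.startswith kv.1 "2" then acc + kv.2 else acc) 0
  let failed_or_aborted : Int := attempted - succeeded
  (attempted, succeeded, failed_or_aborted, status_codes.items)

-- ===== PRECONDITION & SPEC =====
-- Pre_ excludes exactly the inputs where Python A raises IndexError: a non-header row with fewer than 2 columns.
def Pre_process_fetch_csv (fetch_data : List (List String)) : Prop :=
  ∀ row ∈ fetch_data.drop 1, 2 ≤ row.length
instance (fetch_data : List (List String)) : Decidable (Pre_process_fetch_csv fetch_data) := by
  unfold Pre_process_fetch_csv; infer_instance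
def pvWitness_process_fetch_csv : List (List String) :=
  [["url", "code"], ["a", "200"], ["b", "404"]]
def Spec_process_fetch_csv (fetch_data : List (List String)) (out : Int × Int × Int × (List (String × Int))) : Prop := out = process_fetch_csv_alt fetch_data
instance (fetch_data : List (List String)) (out : Int × Int × Int × (List (String × Int))) : Decidable (Spec_process_fetch_csv fetch_data out) := by unfold Spec_process_fetch_csv; infer_instance

-- ===== CLAIM (what is proved, stated in full; the proofs are below) =====
def Claim_equal_process_fetch_csv : Prop := ∀ (fetch_data : List (List String)), Dom_process_fetch_csv fetch_data → Pre_process_fetch_csv fetch_data → Spec_process_fetch_csv fetch_data (process_fetch_csv fetch_data)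

-- ===== LEMMAS AND PROOFS =====

-- summing the counts of the 2xx keys of a counter equals counting the 2xx occurrences
theorem pv_succ_eq (keys : List String) :
    (PySem.Dict.counter keys).items.foldl
      (fun acc kv => if PySem.Str.startswith kv.1 "2" then acc + kv.2 else acc) 0
    = ((keys.countP (fun k => PySem.Str.startswith k "2") : Nat) : Int) := by
  rw [PySem.Dict.items_counter]
  rw [PySem.List.foldl_if_eq_foldl_filter]
  rw [PySem.List.foldl_add (g := fun kv : String × Int => kv.2) (l := ((PySem.Set.ofList keys).map (fun k => (k, (keys.count k : Int)))).filter (fun kv => PySem.Str.startswith kv.1 "2")) (a := 0)]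
  have hperm : (PySem.Set.ofList keys).Perm keys.dedup := by
    apply (List.perm_ext_iff_of_nodup (PySem.Set.nodup_ofList keys) keys.nodup_dedup).2
    intro x
    rw [PySem.Set.mem_ofList, List.mem_dedup]
  have h2 : ((PySem.Set.ofList keys).map (fun k => (k, (keys.count k : Int)))).filter
        (fun kv => PySem.Str.startswith kv.1 "2")
      = ((PySem.Set.ofList keys).filter (fun k => PySem.Str.startswith k "2")).map
        (fun k => (k, (keys.count k : Int))) := by
    rw [List.filter_map]
    rfl
  rw [h2, List.map_map]
  simp only [Function.comp_def, zero_add]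
  have h3 : ((PySem.Set.ofList keys).filter (fun k => PySem.Str.startswith k "2")).Perm
      (keys.dedup.filter (fun k => PySem.Str.startswith k "2")) := hperm.filter _
  have h4 := (h3.map (fun k => (keys.count k : Int))).sum_eq
  rw [h4, ← List.sum_map_count_dedup_filter_eq_countP (fun k => PySem.Str.startswith k "2") keys,
    Nat.cast_list_sum, List.map_map]
  rfl

theorem process_fetch_csv_eq (fetch_data : List (List String)) :
    process_fetch_csv fetch_data = process_fetch_csv_alt fetch_data := by
  unfold process_fetch_csv process_fetch_csv_alt
  have hd : (PySem.List.slice fetch_data (some 1) none).foldl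
      (fun d row => d.modify (pvRowCode row) 0 (· + 1)) PySem.Dict.empty
      = PySem.Dict.counter ((PySem.List.slice fetch_data (some 1) none).map pvRowCode) := by
    rw [PySem.Dict.counter_eq_foldl, List.foldl_map]
  have hs : (PySem.List.slice fetch_data (some 1) none).foldl
      (fun acc row => if PySem.Str.startswith (pvRowCode row) "2" then acc + 1 else acc) (0 : Int)
      = (((PySem.List.slice fetch_data (some 1) none).map pvRowCode).countP
          (fun k => PySem.Str.startswith k "2") : Int) := by
    rw [PySem.List.foldl_if_add_one, List.countP_map, zero_add]
    simp only [Function.comp_def]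
  simp only [hd, hs, pv_succ_eq]

-- ===== VERDICT (by name: the statement is the Claim_ definition above) =====
theorem process_fetch_csv_spec : Claim_equal_process_fetch_csv := by
  intro fetch_data _ _
  unfold Spec_process_fetch_csv
  exact process_fetch_csv_eq fetch_data
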